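-- pv_equiv track=rewrite | github.com/SaarShai/Primes-Equispaced | experiments/kernel_correction_verify.py | mertens_table
-- ===== SOURCE A (Python) =====
-- def mertens_table(limit):
--     mu = [0] * (limit + 1)
--     mu[1] = 1
--     is_prime = [True] * (limit + 1)
--     primes = []
--     for i in range(2, limit + 1):
--         if is_prime[i]:
--             primes.append(i)
--             mu[i] = -1
--         for pp in primes:
--             if i * pp > limit:
--                 break
--             is_prime[i * pp] = False
--             if i % pp == 0:
--                 mu[i * pp] = 0
--                 break
--             else:
--                 mu[i * pp] = -mu[i]
--     M = [0] * (limit + 1)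
--     for n in range(1, limit + 1):
--         M[n] = M[n-1] + mu[n]
--     return M, mu
-- ===== SOURCE B (Python) =====
-- def mertens_table(limit):
--     def mu_of(n):
--         # n is odd and >= 1 here
--         result = 1
--         d = 3
--         while d * d <= n:
--             if n % d == 0:
--                 n //= d
--                 if n % d == 0:
--                     return 0
--                 result = -result
--             else:
--                 d += 2
--         if n > 1:
--             result = -result
--         return result
--     mu = [0]
--     for n in range(1, limit + 1):
--         if n % 2 == 0:
--             mu.append(0 if n % 4 == 0 else -mu[n // 2])
--         else:
--             mu.append(mu_of(n))
--     M = [0]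
--     for v in mu[1:]:
--         M.append(M[-1] + v)
--     return M, mu
-- ===== Notes on version B (the rewrite author's own statement) =====
-- stated objective: alternative
-- what changed: Replaces the shared linear (Euler) sieve that fills mu via prime lists and is_prime marking with an independent per-number trial-division computation of the Moebius value, and builds the Mertens prefix sums by appending to a running list instead of indexing a preallocated one.
import Mathlib
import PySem

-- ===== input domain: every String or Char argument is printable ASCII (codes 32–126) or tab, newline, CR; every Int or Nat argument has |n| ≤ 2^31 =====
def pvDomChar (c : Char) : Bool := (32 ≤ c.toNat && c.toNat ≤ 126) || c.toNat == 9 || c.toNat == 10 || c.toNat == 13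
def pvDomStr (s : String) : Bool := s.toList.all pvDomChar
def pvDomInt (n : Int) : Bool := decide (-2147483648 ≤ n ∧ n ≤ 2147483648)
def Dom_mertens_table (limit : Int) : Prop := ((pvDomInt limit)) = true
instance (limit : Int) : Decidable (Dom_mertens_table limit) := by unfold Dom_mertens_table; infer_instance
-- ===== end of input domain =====

-- B replaces A's shared linear (Euler) sieve by an independent per-number trial-division
-- Moebius computation and running-sum prefix list: a different algorithm of similar size (not faster).
-- ===== PORT A =====
def pvInnerA (i limit : Int) (primes : List Int) (st : List Bool × List Int) : List Bool × List Int :=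
  match primes with
  | [] => st
  | pp :: rest =>
    if limit < i * pp then st
    else
      let isp := PySem.List.pySetD st.1 (i * pp) false
      if PySem.Int.mod i pp == 0 then (isp, PySem.List.pySetD st.2 (i * pp) 0)
      else pvInnerA i limit rest (isp, PySem.List.pySetD st.2 (i * pp) (-(PySem.List.pyGetD st.2 i 0)))

def pvOuterA (limit : Int) (st : List Int × List Bool × List Int) (i : Int) : List Int × List Bool × List Int :=
  let s1 := if PySem.List.pyGetD st.2.1 i true then (st.2.2 ++ [i], PySem.List.pySetD st.1 i (-1))
            else (st.2.2, st.1)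
  let s2 := pvInnerA i limit s1.1 (st.2.1, s1.2)
  (s2.2, s2.1, s1.1)

def pvSieveA (limit : Int) : List Int × List Bool × List Int :=
  (PySem.List.pyRange 2 (limit + 1) 1).foldl (pvOuterA limit)
    (PySem.List.pySetD (List.replicate (limit + 1).toNat (0 : Int)) 1 1,
     List.replicate (limit + 1).toNat true, ([] : List Int))

def pvMertM (limit : Int) (mu : List Int) : List Int :=
  (PySem.List.pyRange 1 (limit + 1) 1).foldl
    (fun M n => PySem.List.pySetD M n
      (PySem.List.pyGetD M (n - 1) 0 + PySem.List.pyGetD mu n 0))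
    (List.replicate (limit + 1).toNat (0 : Int))

def mertens_table (limit : Int) : List Int × List Int :=
  (pvMertM limit (pvSieveA limit).1, (pvSieveA limit).1)

-- ===== PORT B =====
def pvMuGo (n d : Nat) (res : Int) : Int :=
  if h : 2 ≤ d ∧ d * d ≤ n then
    if n % d == 0 then
      if (n / d) % d == 0 then 0 else pvMuGo (n / d) d (-res)
    else pvMuGo n (d + 2) res
  else if 1 < n then -res else res
termination_by 2 * n - d
decreasing_by
  · have hd : d ≤ n := le_trans (Nat.le_mul_of_pos_left d (by omega)) h.2
    have : n / d < n := Nat.div_lt_self (by omega) (by omega)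
    omega
  · have hd : d ≤ n := le_trans (Nat.le_mul_of_pos_left d (by omega)) h.2
    have h4 : 4 ≤ n := le_trans (by nlinarith [h.1] : 4 ≤ d * d) h.2
    omega

def pvMuOf (n : Int) : Int := pvMuGo n.toNat 3 1

def mertens_table_alt (limit : Int) : List Int × List Int :=
  let mu := (PySem.List.pyRange 1 (limit + 1) 1).foldl
    (fun mu n =>
      if PySem.Int.mod n 2 == 0 then
        mu ++ [if PySem.Int.mod n 4 == 0 then (0 : Int)
               else -(PySem.List.pyGetD mu (PySem.Int.floordiv n 2) 0)]
      else mu ++ [pvMuOf n]) [(0 : Int)]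
  let M := (PySem.List.slice mu (some 1) none).foldl
      (fun M v => M ++ [PySem.List.pyGetD M (-1) 0 + v]) [(0 : Int)]
  (M, mu)

-- ===== PRECONDITION & SPEC =====
-- Pre_ excludes exactly limit <= 0, where A raises IndexError at mu[1] = 1.
def Pre_mertens_table (limit : Int) : Prop := 1 ≤ limit
instance (limit : Int) : Decidable (Pre_mertens_table limit) := by unfold Pre_mertens_table; infer_instance
def pvWitness_mertens_table : Int := 5
def Spec_mertens_table (limit : Int) (out : List Int × List Int) : Prop := out = mertens_table_alt limit
instance (limit : Int) (out : List Int × List Int) : Decidable (Spec_mertens_table limit out) := by unfold Spec_mertens_table; infer_instance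

-- ===== CLAIM (what is proved, stated in full; the proofs are below) =====
def Claim_equal_mertens_table : Prop := ∀ (limit : Int), Dom_mertens_table limit → Pre_mertens_table limit → Spec_mertens_table limit (mertens_table limit)

-- ===== LEMMAS AND PROOFS =====

-- reference Moebius function via the smallest-prime-factor recursion
def pvMuSpec (n : Nat) : Int :=
  if n ≤ 1 then (if n = 1 then 1 else 0)
  else if n.minFac ∣ n / n.minFac then 0 else -pvMuSpec (n / n.minFac)
termination_by n
decreasing_by
  have := (Nat.minFac_prime (by omega : n ≠ 1)).two_le
  exact Nat.div_lt_self (by omega) (by omega)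

def pvSref (n : Nat) : Int := ((List.range (n + 1)).map pvMuSpec).sum
def pvMuRef (N : Nat) : List Int := (List.range N).map pvMuSpec
def pvMRef (N : Nat) : List Int := (List.range N).map pvSref
def pvCompLe (k j : Nat) : Bool := !decide (Nat.Prime j) && decide (2 ≤ j) && decide (j / j.minFac ≤ k)
def pvWriterLe (k j : Nat) : Bool := (decide (Nat.Prime j) && decide (j ≤ k)) || pvCompLe k j
def pvPrimesUpto (k : Nat) : List Nat := (List.range (k + 1)).filter (fun m => decide (Nat.Prime m))
def pvInv (N k : Nat) (st : List Int × List Bool × List Int) : Prop :=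
  st.1.length = N ∧ st.2.1.length = N ∧
  st.2.2 = (pvPrimesUpto k).map (fun q : Nat => (q : Int)) ∧
  (∀ j, j < N → st.1.getD j 0 = if (j == 1 || pvWriterLe k j) then pvMuSpec j else 0) ∧
  (∀ j, j < N → st.2.1.getD j true = !pvCompLe k j)

theorem pvMuSpec_zero : pvMuSpec 0 = 0 := by simp [pvMuSpec]
theorem pvMuSpec_one : pvMuSpec 1 = 1 := by simp [pvMuSpec]
theorem pvMuSpec_of_two_le {n : Nat} (h : 2 ≤ n) :
    pvMuSpec n = if n.minFac ∣ n / n.minFac then 0 else -pvMuSpec (n / n.minFac) := by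
  rw [pvMuSpec]; simp [Nat.not_le.2 (by omega : 1 < n)]

theorem pvMuSpec_prime {p : Nat} (hp : p.Prime) : pvMuSpec p = -1 := by
  rw [pvMuSpec_of_two_le hp.two_le, hp.minFac_eq, Nat.div_self hp.pos]
  simp [Nat.dvd_one, Nat.Prime.ne_one hp, pvMuSpec_one]

theorem pvMinFac_mul {i q : Nat} (hq : q.Prime) (hi : 2 ≤ i) (hle : q ≤ i.minFac) :
    (i * q).minFac = q := by
  have h1 : (i * q).minFac ≤ q := Nat.minFac_le_of_dvd hq.two_le ⟨i, by ring⟩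
  have hne : i * q ≠ 1 := by nlinarith [hq.two_le]
  have h2 : (i * q).minFac.Prime := Nat.minFac_prime hne
  have h3 : (i * q).minFac ∣ i * q := Nat.minFac_dvd _
  rcases (Nat.Prime.dvd_mul h2).1 h3 with h | h
  · have := Nat.minFac_le_of_dvd h2.two_le h
    omega
  · exact (Nat.prime_dvd_prime_iff_eq h2 hq).1 h

theorem pvMuSpec_mul_zero {i q : Nat} (hq : q.Prime) (hi : 2 ≤ i) (hle : q ≤ i.minFac)
    (hd : q ∣ i) : pvMuSpec (i * q) = 0 := by
  have h4 : 2 ≤ i * q := by nlinarith [hq.two_le]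
  rw [pvMuSpec_of_two_le h4, pvMinFac_mul hq hi hle, Nat.mul_div_cancel _ hq.pos]
  simp [hd]

theorem pvMuSpec_mul_neg {i q : Nat} (hq : q.Prime) (hi : 2 ≤ i) (hle : q ≤ i.minFac)
    (hnd : ¬ q ∣ i) : pvMuSpec (i * q) = -pvMuSpec i := by
  have h4 : 2 ≤ i * q := by nlinarith [hq.two_le]
  rw [pvMuSpec_of_two_le h4, pvMinFac_mul hq hi hle, Nat.mul_div_cancel _ hq.pos]
  simp [hnd]
-- helper: getD of set
theorem pvGetD_set {α : Type} (xs : List α) (i j : Nat) (v d : α) :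
    (xs.set i v).getD j d = if i = j ∧ i < xs.length then v else xs.getD j d := by
  by_cases hj : j < xs.length
  · rw [List.getD_eq_getElem?_getD, List.getElem?_set]
    split_ifs with h1 h2 h3 h3 <;> simp_all [List.getD_eq_getElem?_getD]
  · have hj' : ¬ j < (xs.set i v).length := by simpa using hj
    rw [List.getD_eq_getElem?_getD, List.getElem?_eq_none (by simpa using hj')]
    rw [List.getD_eq_getElem?_getD, List.getElem?_eq_none (by omega)]
    split_ifs with h
    · omega
    · rfl

theorem pvCompDivGe2 {j : Nat} (h2 : 2 ≤ j) (hnp : ¬ Nat.Prime j) : 2 ≤ j / j.minFac := by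
  have hp := Nat.minFac_prime (by omega : j ≠ 1)
  have hd := Nat.minFac_dvd j
  have h1 : 1 ≤ j / j.minFac := (Nat.one_le_div_iff hp.pos).2 (Nat.le_of_dvd (by omega) hd)
  rcases Nat.lt_or_ge (j / j.minFac) 2 with h | h
  · exfalso
    have he : j / j.minFac = 1 := by omega
    have hm := Nat.div_mul_cancel hd
    rw [he, one_mul] at hm
    exact hnp (hm ▸ hp)
  · exact h

theorem pvCompDiv_lt {j : Nat} (h2 : 2 ≤ j) : j / j.minFac < j := by
  have hp := Nat.minFac_prime (by omega : j ≠ 1)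
  exact Nat.div_lt_self (by omega) hp.two_le

def pvDoneW (i c j : Nat) : Bool :=
  (List.range (c + 1)).any (fun q => decide (Nat.Prime q) && decide (j = i * q))
def pvMidSet (k i c j : Nat) : Bool :=
  j == 1 || pvWriterLe k j || (decide (j = i) && decide (Nat.Prime i)) || pvDoneW i c j
def pvCompMid (k i c j : Nat) : Bool := pvCompLe k j || pvDoneW i c j

theorem pvDoneW_iff {i c j : Nat} :
    pvDoneW i c j = true ↔ ∃ q, Nat.Prime q ∧ q ≤ c ∧ j = i * q := by
  unfold pvDoneW
  rw [List.any_eq_true]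
  constructor
  · rintro ⟨q, hq, hb⟩
    simp only [Bool.and_eq_true, decide_eq_true_eq] at hb
    exact ⟨q, hb.1, by simpa using Nat.lt_succ_iff.1 (List.mem_range.1 hq), hb.2⟩
  · rintro ⟨q, h1, h2, h3⟩
    exact ⟨q, List.mem_range.2 (by omega), by simp [h1, h3]⟩

theorem pvMul_not_prime {i q : Nat} (hi : 2 ≤ i) (hq : 2 ≤ q) : ¬ (i * q).Prime := by
  intro hp
  rcases (Nat.prime_mul_iff.1 hp) with ⟨_, h⟩ | ⟨_, h⟩ <;> omega

-- composite-writer closure: end-of-iteration equivalences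
theorem pvCompEnd_iff {lim k i c j : Nat} (hi2 : 2 ≤ i) (hik : i = k + 1) (hil : i ≤ lim)
    (hb : c ≤ i.minFac)
    (hc : ∀ q, Nat.Prime q → q ≤ i.minFac → i * q ≤ lim → q ≤ c)
    (hj : j < lim + 1) :
    pvCompLe (k + 1) j = true ↔ pvCompMid k i c j = true := by
  unfold pvCompMid
  simp only [Bool.or_eq_true, pvDoneW_iff]
  unfold pvCompLe
  simp only [Bool.and_eq_true, decide_eq_true_eq, Bool.not_eq_eq_eq_not, Bool.not_true,
    decide_eq_false_iff_not, Bool.not_eq_true']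
  constructor
  · rintro ⟨⟨hnp, h2j⟩, hw⟩
    have hnp' : ¬ Nat.Prime j := by simpa using hnp
    rcases Nat.lt_or_ge (j / j.minFac) (k + 1) with h | h
    · exact Or.inl ⟨⟨hnp, h2j⟩, by omega⟩
    · have hwi : j / j.minFac = i := by omega
      have hq := Nat.minFac_prime (by omega : j ≠ 1)
      have hqd := Nat.minFac_dvd j
      have hji : j = i * j.minFac := by
        rw [← hwi]; exact (Nat.div_mul_cancel hqd).symm
      have hqle : j.minFac ≤ i.minFac := by
        have hidvd : i ∣ j := ⟨j.minFac, hji⟩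
        have : i.minFac ∣ j := (Nat.minFac_dvd i).trans hidvd
        have h5 := Nat.minFac_le_of_dvd (Nat.minFac_prime (by omega : i ≠ 1)).two_le this
        exact h5
      have : j.minFac ≤ c := hc j.minFac hq hqle (by omega)
      exact Or.inr ⟨j.minFac, hq, this, hji⟩
  · rintro (⟨⟨hnp, h2j⟩, hw⟩ | ⟨q, hq, hqc, hjq⟩)
    · exact ⟨⟨hnp, h2j⟩, by omega⟩
    · subst hjq
      have hqi : q ≤ i.minFac := le_trans hqc hb
      refine ⟨⟨by simpa using pvMul_not_prime hi2 hq.two_le, by nlinarith [hq.two_le]⟩, ?_⟩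
      rw [pvMinFac_mul hq hi2 hqi, Nat.mul_div_cancel _ hq.pos]
      omega

theorem pvMidEnd_iff {lim k i c j : Nat} (hi2 : 2 ≤ i) (hik : i = k + 1) (hil : i ≤ lim)
    (hb : c ≤ i.minFac)
    (hc : ∀ q, Nat.Prime q → q ≤ i.minFac → i * q ≤ lim → q ≤ c)
    (hj : j < lim + 1) :
    (j == 1 || pvWriterLe (k + 1) j) = true ↔ pvMidSet k i c j = true := by
  have hco0 := pvCompEnd_iff (lim := lim) (c := c) hi2 hik hil hb hc hj
  have hco : pvCompLe (k + 1) j = true ↔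
      (pvCompLe k j = true ∨ ∃ q, Nat.Prime q ∧ q ≤ c ∧ j = i * q) := by
    rw [hco0]; unfold pvCompMid; simp [pvDoneW_iff]
  unfold pvMidSet pvWriterLe at *
  simp only [Bool.or_eq_true, Bool.and_eq_true, decide_eq_true_eq, beq_iff_eq] at *
  constructor
  · rintro (h1 | ⟨hp, hle⟩ | hcl)
    · exact Or.inl (Or.inl (Or.inl h1))
    · rcases Nat.lt_or_ge j (k + 1) with h | h
      · exact Or.inl (Or.inl (Or.inr (Or.inl ⟨hp, by omega⟩)))
      · have : j = i := by omega
        exact Or.inl (Or.inr ⟨this, this ▸ hp⟩)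
    · rcases hco.1 hcl with h | h
      · exact Or.inl (Or.inl (Or.inr (Or.inr (by
          unfold pvCompLe at *
          simp only [Bool.and_eq_true, decide_eq_true_eq] at *
          exact ⟨h.1, by omega⟩))))
      · exact Or.inr (pvDoneW_iff.2 h)
  · rintro (((h1 | ⟨hp, hle⟩ | hcl) | ⟨hji, hpi⟩) | hd)
    · exact Or.inl h1
    · exact Or.inr (Or.inl ⟨hp, by omega⟩)
    · refine Or.inr (Or.inr ?_)
      unfold pvCompLe at *
      simp only [Bool.and_eq_true, decide_eq_true_eq] at *
      exact ⟨hcl.1, by omega⟩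
    · exact Or.inr (Or.inl ⟨hji ▸ hpi, by omega⟩)
    · exact Or.inr (Or.inr (hco.2 (Or.inr (pvDoneW_iff.1 hd))))


-- ===== B side =====
theorem pvMuGo_spec (n d : Nat) (res : Int) (h1 : 1 ≤ n) (h2 : 3 ≤ d) (hodd : d % 2 = 1)
    (h3 : ∀ m, 2 ≤ m → m < d → ¬ m ∣ n) : pvMuGo n d res = res * pvMuSpec n := by
  induction n, d, res using pvMuGo.induct with
  | case1 n d res hg hdvd hdvd2 =>
    have hdn : d ∣ n := Nat.dvd_iff_mod_eq_zero.2 (by simpa using hdvd)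
    have hdn2 : d ∣ n / d := Nat.dvd_iff_mod_eq_zero.2 (by simpa using hdvd2)
    have hmf : n.minFac = d := by
      have hub : n.minFac ≤ d := Nat.minFac_le_of_dvd (by omega) hdn
      have hne1 : n ≠ 1 := by nlinarith [hg.2]
      have h2m : 2 ≤ n.minFac := (Nat.minFac_prime hne1).two_le
      by_contra hne
      exact h3 n.minFac h2m (by omega) (Nat.minFac_dvd n)
    rw [pvMuGo]
    simp only [hg, hdvd, hdvd2, and_self, dif_pos, if_pos]
    rw [pvMuSpec_of_two_le (by nlinarith [hg.2] : 2 ≤ n), hmf, if_pos hdn2]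
    ring
  | case2 n d res hg hdvd hdvd2 ih =>
    have hdn : d ∣ n := Nat.dvd_iff_mod_eq_zero.2 (by simpa using hdvd)
    have hdn2 : ¬ d ∣ n / d := fun hc => hdvd2 (by simpa using Nat.dvd_iff_mod_eq_zero.1 hc)
    have hmf : n.minFac = d := by
      have hub : n.minFac ≤ d := Nat.minFac_le_of_dvd (by omega) hdn
      have hne1 : n ≠ 1 := by nlinarith [hg.2]
      have h2m : 2 ≤ n.minFac := (Nat.minFac_prime hne1).two_le
      by_contra hne
      exact h3 n.minFac h2m (by omega) (Nat.minFac_dvd n)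
    have hdle : d ≤ n := le_trans (Nat.le_mul_of_pos_left d (by omega)) hg.2
    have ih' := ih ((Nat.one_le_div_iff (by omega)).2 hdle) h2 hodd
      (fun m hm hmd hdvdm => h3 m hm hmd (hdvdm.trans (Nat.div_dvd_of_dvd hdn)))
    rw [pvMuGo]
    simp only [hg, hdvd, and_self, dif_pos, if_pos]
    rw [if_neg hdvd2, ih', pvMuSpec_of_two_le (by nlinarith [hg.2] : 2 ≤ n), hmf, if_neg hdn2]
    ring
  | case3 n d res hg hndvd ih =>
    have hdn : ¬ d ∣ n := fun hc => hndvd (by simpa using Nat.dvd_iff_mod_eq_zero.1 hc)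
    rw [pvMuGo]
    simp only [hg, and_self, dif_pos]
    rw [if_neg hndvd]
    refine ih h1 (by omega) (by omega) (fun m hm hmd => ?_)
    rcases Nat.lt_or_ge m d with h | h
    · exact h3 m hm h
    · rcases Nat.lt_or_ge m (d + 1) with h4 | h4
      · have : m = d := by omega
        exact this ▸ hdn
      · have hmd1 : m = d + 1 := by omega
        have h2m : 2 ∣ m := by omega
        intro hmn
        exact h3 2 (le_refl 2) (by omega) (dvd_trans h2m hmn)
  | case4 n d res hg hgt =>
    have hdd : n < d * d := by
      rcases Nat.lt_or_ge n (d * d) with h | h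
      · exact h
      · exact absurd ⟨by omega, h⟩ hg
    have hp : n.Prime := by
      by_contra hnp
      have hsq : n.minFac * n.minFac ≤ n := by
        have := Nat.minFac_sq_le_self (by omega : 0 < n) hnp
        nlinarith [this, sq_nonneg n.minFac, (by ring_nf : n.minFac ^ 2 = n.minFac * n.minFac)]
      have h2m : 2 ≤ n.minFac := (Nat.minFac_prime (by omega : n ≠ 1)).two_le
      have hlt : n.minFac < d := by nlinarith
      exact h3 n.minFac h2m hlt (Nat.minFac_dvd n)
    rw [pvMuGo]
    simp only [hg, dif_neg, not_false_iff, hgt, if_pos]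
    rw [pvMuSpec_prime hp]; ring
  | case5 n d res hg hle =>
    have : n = 1 := by omega
    subst this
    rw [pvMuGo]
    simp only [hg, dif_neg, not_false_iff]
    rw [pvMuSpec_one]; simp

theorem pvMuOf_odd (n : Nat) (h1 : 1 ≤ n) (hodd : ¬ 2 ∣ n) : pvMuOf (n : Int) = pvMuSpec n := by
  unfold pvMuOf
  simp only [Int.toNat_natCast]
  rw [pvMuGo_spec n 3 1 h1 (le_refl 3) rfl (fun m hm hmd hdvd => by
    have : m = 2 := by omega
    exact hodd (this ▸ hdvd))]
  ring

theorem pvMuSpec_even (n : Nat) (h2 : 2 ≤ n) (he : 2 ∣ n) :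
    pvMuSpec n = if 2 ∣ n / 2 then 0 else -pvMuSpec (n / 2) := by
  have hmf : n.minFac = 2 := by
    have h1 : n.minFac ≤ 2 := Nat.minFac_le_of_dvd (le_refl 2) he
    have h2m : 2 ≤ n.minFac := (Nat.minFac_prime (by omega : n ≠ 1)).two_le
    omega
  rw [pvMuSpec_of_two_le h2, hmf]

def pvScanAux (a : Int) : List Int → List Int
  | [] => []
  | v :: vs => (a + v) :: pvScanAux (a + v) vs

theorem pvScanAux_append_singleton (a : Int) (xs : List Int) (x : Int) :
    pvScanAux a (xs ++ [x]) = pvScanAux a xs ++ [a + xs.sum + x] := by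
  induction xs generalizing a with
  | nil => simp [pvScanAux]
  | cons v xs ih => simp [pvScanAux, ih, add_assoc]

theorem pvFoldB (vs M : List Int) :
    vs.foldl (fun M v => M ++ [PySem.List.pyGetD M (-1) 0 + v]) M
      = M ++ pvScanAux (PySem.List.pyGetD M (-1) 0) vs := by
  induction vs generalizing M with
  | nil => simp [pvScanAux]
  | cons v vs ih =>
    rw [List.foldl_cons, ih]
    simp [PySem.List.pyGetD_neg_one_append_singleton, pvScanAux]

theorem pvSum_shift (m : Nat) :
    ((List.range m).map (fun t => pvMuSpec (t + 1))).sum = pvSref m := by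
  unfold pvSref
  rw [List.range_succ_eq_map]
  simp [pvMuSpec_zero, List.map_map, Function.comp_def, Nat.succ_eq_add_one]

theorem pvSref_succ (m : Nat) : pvSref (m + 1) = pvSref m + pvMuSpec (m + 1) := by
  unfold pvSref
  rw [List.range_succ]
  simp

theorem pvScan_ref (m : Nat) :
    (0 : Int) :: pvScanAux 0 ((List.range m).map (fun t => pvMuSpec (t + 1)))
      = (List.range (m + 1)).map pvSref := by
  induction m with
  | zero => simp [pvScanAux, pvSref, pvMuSpec_zero]
  | succ m ih =>
    rw [List.range_succ, List.map_append, List.map_singleton, pvScanAux_append_singleton]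
    rw [List.range_succ (n := m + 1), List.map_append]
    rw [← ih]
    simp [pvSum_shift, pvSref_succ]

theorem pvMuRef_getD (N j : Nat) (h : j < N) : (pvMuRef N).getD j 0 = pvMuSpec j := by
  unfold pvMuRef
  rw [List.getD_eq_getElem?_getD]
  simp [List.getElem?_map, List.getElem?_range h]

theorem pvAltMu (lim : Nat) : ∀ k, k ≤ lim →
    (PySem.List.pyRange 1 ((k : Int) + 1) 1).foldl
      (fun mu n =>
        if PySem.Int.mod n 2 == 0 then
          mu ++ [if PySem.Int.mod n 4 == 0 then (0 : Int)
                 else -(PySem.List.pyGetD mu (PySem.Int.floordiv n 2) 0)]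
        else mu ++ [pvMuOf n]) [(0 : Int)]
    = pvMuRef (k + 1) := by
  intro k
  induction k with
  | zero =>
    intro _
    rw [PySem.List.pyRange_one_eq_nil (by norm_num), List.foldl_nil]
    simp [pvMuRef, pvMuSpec_zero, List.range_succ]
  | succ n ihn =>
    intro hle
    have hsplit : PySem.List.pyRange 1 (((n + 1 : Nat) : Int) + 1) 1
        = PySem.List.pyRange 1 ((n : Int) + 1) 1 ++ [(n : Int) + 1] := by
      have : ((n + 1 : Nat) : Int) + 1 = ((n : Int) + 1) + 1 := by push_cast; ring
      rw [this, PySem.List.pyRange_one_succ_right (by omega)]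
    rw [hsplit, List.foldl_append, ihn (by omega)]
    simp only [List.foldl_cons, List.foldl_nil]
    have hc2 : ((n : Int) + 1) = ((n + 1 : Nat) : Int) := by push_cast; ring
    have hmuref : pvMuRef (n + 1 + 1) = pvMuRef (n + 1) ++ [pvMuSpec (n + 1)] := by
      unfold pvMuRef
      rw [List.range_succ (n := n + 1), List.map_append]
      rfl
    rw [hc2, hmuref]
    by_cases he : 2 ∣ (n + 1)
    · have hcond : (PySem.Int.mod ((n + 1 : Nat) : Int) 2 == 0) = true := by
        rw [beq_iff_eq]
        exact (PySem.Int.mod_eq_zero_iff_dvd _ _).2 (by exact_mod_cast he)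
      rw [if_pos hcond]
      have hval : (if PySem.Int.mod ((n + 1 : Nat) : Int) 4 == 0 then (0 : Int)
          else -(PySem.List.pyGetD (pvMuRef (n + 1)) (PySem.Int.floordiv ((n + 1 : Nat) : Int) 2) 0))
          = pvMuSpec (n + 1) := by
        have hdiv : PySem.Int.floordiv ((n + 1 : Nat) : Int) 2 = (((n + 1) / 2 : Nat) : Int) := by
          exact_mod_cast PySem.Int.floordiv_natCast (n + 1) 2
        rw [hdiv, PySem.List.pyGetD_natCast,
          pvMuRef_getD (n + 1) ((n + 1) / 2) (by omega),
          pvMuSpec_even (n + 1) (by omega) he]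
        have h42 : (4 : Nat) ∣ (n + 1) ↔ 2 ∣ (n + 1) / 2 := by
          rw [Nat.dvd_div_iff_mul_dvd he]
        by_cases h4 : (4 : Nat) ∣ (n + 1)
        · rw [if_pos (by
            rw [beq_iff_eq]
            exact (PySem.Int.mod_eq_zero_iff_dvd _ _).2 (by exact_mod_cast h4)),
            if_pos (h42.1 h4)]
        · rw [if_neg (fun hc => h4 (by
            rw [beq_iff_eq] at hc
            exact_mod_cast (PySem.Int.mod_eq_zero_iff_dvd _ _).1 hc)),
            if_neg (fun hc => h4 (h42.2 hc))]
      rw [hval]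
    · have hcond : ¬ (PySem.Int.mod ((n + 1 : Nat) : Int) 2 == 0) = true := by
        rw [beq_iff_eq]
        intro hc
        exact he (by exact_mod_cast (PySem.Int.mod_eq_zero_iff_dvd _ _).1 hc)
      rw [if_neg hcond, pvMuOf_odd (n + 1) (by omega) he]

theorem pvB_eq (lim : Nat) (h : 1 ≤ lim) :
    mertens_table_alt (lim : Int) = (pvMRef (lim + 1), pvMuRef (lim + 1)) := by
  unfold mertens_table_alt
  have hmu := pvAltMu lim lim (le_refl lim)
  simp only [hmu]
  have htail : PySem.List.slice (pvMuRef (lim + 1)) (some 1) none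
      = (List.range lim).map (fun t => pvMuSpec (t + 1)) := by
    rw [PySem.List.slice_from_one]
    unfold pvMuRef
    rw [List.range_succ_eq_map]
    simp [List.map_map, Function.comp_def, Nat.succ_eq_add_one]
  have hget : PySem.List.pyGetD [(0 : Int)] (-1) 0 = 0 := by decide
  simp only [htail, pvFoldB, hget]
  unfold pvMRef
  rw [← pvScan_ref lim]
  simp

-- ===== A side =====

def pvEndState (lim k : Nat) (r : List Bool × List Int) : Prop :=
  r.2.length = lim + 1 ∧ r.1.length = lim + 1 ∧
  (∀ j, j < lim + 1 → r.2.getD j 0 = if (j == 1 || pvWriterLe (k + 1) j) then pvMuSpec j else 0) ∧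
  (∀ j, j < lim + 1 → r.1.getD j true = !pvCompLe (k + 1) j)

theorem pvEnd_of_mid (lim k i c : Nat) (hi2 : 2 ≤ i) (hik : i = k + 1) (hil : i ≤ lim)
    (hb : c ≤ i.minFac) (hc : ∀ q, Nat.Prime q → q ≤ i.minFac → i * q ≤ lim → q ≤ c)
    (isp : List Bool) (mu : List Int) (hlmu : mu.length = lim + 1) (hlisp : isp.length = lim + 1)
    (hmu : ∀ j, j < lim + 1 → mu.getD j 0 = if pvMidSet k i c j then pvMuSpec j else 0)
    (hisp : ∀ j, j < lim + 1 → isp.getD j true = !pvCompMid k i c j) :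
    pvEndState lim k (isp, mu) := by
  refine ⟨hlmu, hlisp, ?_, ?_⟩
  · intro j hj
    rw [hmu j hj]
    by_cases h : (j == 1 || pvWriterLe (k + 1) j) = true
    · rw [if_pos h, if_pos ((pvMidEnd_iff hi2 hik hil hb hc hj).1 h)]
    · rw [if_neg h, if_neg (fun hm => h ((pvMidEnd_iff hi2 hik hil hb hc hj).2 hm))]
  · intro j hj
    rw [hisp j hj]
    by_cases h : pvCompLe (k + 1) j = true
    · rw [h, (pvCompEnd_iff hi2 hik hil hb hc hj).1 h]
    · have h2 : ¬ pvCompMid k i c j = true :=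
        fun hm => h ((pvCompEnd_iff hi2 hik hil hb hc hj).2 hm)
      simp [Bool.eq_false_iff.2 h, Bool.eq_false_iff.2 h2]

theorem pvInner_spec (lim k i : Nat) (hi2 : 2 ≤ i) (hik : i = k + 1) (hil : i ≤ lim) :
    ∀ (ps : List Nat) (c : Nat) (isp : List Bool) (mu : List Int),
    (∀ q ∈ ps, Nat.Prime q ∧ q ≤ i ∧ c < q) →
    ps.Pairwise (· < ·) →
    (∀ q, Nat.Prime q → q ≤ i → c < q → q ∈ ps) →
    (∀ q, Nat.Prime q → q ≤ c → ¬ q ∣ i ∧ i * q ≤ lim) →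
    mu.length = lim + 1 → isp.length = lim + 1 →
    (∀ j, j < lim + 1 → mu.getD j 0 = if pvMidSet k i c j then pvMuSpec j else 0) →
    (∀ j, j < lim + 1 → isp.getD j true = !pvCompMid k i c j) →
    pvEndState lim k (pvInnerA (i : Int) (lim : Int) (ps.map (fun q : Nat => (q : Int))) (isp, mu)) := by
  intro ps
  induction ps with
  | nil =>
    intro c isp mu hmem hsort hcompl hdone hlmu hlisp hmu hisp
    simp only [List.map_nil]
    rw [pvInnerA]
    have hgt : c < i.minFac := by
      by_contra hle
      exact (hdone i.minFac (Nat.minFac_prime (by omega)) (by omega)).1 (Nat.minFac_dvd i)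
    have hc : ∀ q, Nat.Prime q → q ≤ i.minFac → i * q ≤ lim → q ≤ c := by
      intro q hq hqi _
      by_contra hgtc
      exact absurd (hcompl q hq (le_trans hqi (Nat.minFac_le (by omega))) (by omega))
        (List.not_mem_nil)
    exact pvEnd_of_mid lim k i c hi2 hik hil (by omega) hc isp mu hlmu hlisp hmu hisp
  | cons q rest ih =>
    intro c isp mu hmem hsort hcompl hdone hlmu hlisp hmu hisp
    obtain ⟨hqp, hqi, hcq⟩ := hmem q (List.mem_cons_self)
    have hgt : c < i.minFac := by
      by_contra hle
      exact (hdone i.minFac (Nat.minFac_prime (by omega)) (by omega)).1 (Nat.minFac_dvd i)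
    have hrest_gt : ∀ r ∈ rest, q < r := fun r hr => (List.pairwise_cons.1 hsort).1 r hr
    have hmf_ge : q ≤ i.minFac := by
      by_contra hlt
      have hmem' := hcompl i.minFac (Nat.minFac_prime (by omega)) (Nat.minFac_le (by omega)) hgt
      rcases List.mem_cons.1 hmem' with h | h
      · omega
      · have := hrest_gt _ h; omega
    simp only [List.map_cons]
    rw [pvInnerA]
    by_cases hlt : lim < i * q
    · rw [if_pos (by exact_mod_cast hlt)]
      have hc : ∀ q', Nat.Prime q' → q' ≤ i.minFac → i * q' ≤ lim → q' ≤ c := by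
        intro q' hq' hqi' hql'
        by_contra hgtc
        rcases List.mem_cons.1 (hcompl q' hq' (le_trans hqi' (Nat.minFac_le (by omega))) (by omega)) with h | h
        · subst h; omega
        · have := hrest_gt _ h
          have h3 : i * q < i * q' := by nlinarith
          omega
      exact pvEnd_of_mid lim k i c hi2 hik hil (by omega) hc isp mu hlmu hlisp hmu hisp
    · rw [if_neg (by exact_mod_cast hlt)]
      have hql : i * q ≤ lim := by omega
      have hcast : (i : Int) * (q : Int) = ((i * q : Nat) : Int) := by push_cast; ring
      have hDone_step : ∀ j, pvDoneW i q j = true ↔ (pvDoneW i c j = true ∨ j = i * q) := by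
        intro j
        rw [pvDoneW_iff]
        constructor
        · rintro ⟨q', hq', hqle, rfl⟩
          rcases Nat.lt_or_ge c q' with h | h
          · rcases List.mem_cons.1 (hcompl q' hq' (by omega) h) with h2 | h2
            · subst h2; exact Or.inr rfl
            · have := hrest_gt _ h2; omega
          · exact Or.inl (pvDoneW_iff.2 ⟨q', hq', h, rfl⟩)
        · rintro (h | rfl)
          · obtain ⟨q', h1, h2, h3⟩ := pvDoneW_iff.1 h
            exact ⟨q', h1, by omega, h3⟩
          · exact ⟨q, hqp, le_refl q, rfl⟩
      have hMid_step : ∀ j, pvMidSet k i q j = true ↔ (pvMidSet k i c j = true ∨ j = i * q) := by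
        intro j
        unfold pvMidSet
        simp only [Bool.or_eq_true]
        rw [hDone_step j]
        tauto
      have hmm : ∀ j, ¬ (i * q = j) → pvMidSet k i q j = pvMidSet k i c j := by
        intro j hje
        by_cases h : pvMidSet k i c j = true
        · rw [h]; exact (hMid_step j).2 (Or.inl h)
        · have h2 : ¬ pvMidSet k i q j = true := fun hq1 => by
            rcases (hMid_step j).1 hq1 with h3 | h3
            · exact h h3
            · exact hje h3.symm
          simp [Bool.eq_false_iff.2 h, Bool.eq_false_iff.2 h2]
      have hsetisp : PySem.List.pySetD isp ((i : Int) * (q : Int)) false = isp.set (i * q) false := by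
        rw [hcast, PySem.List.pySetD_natCast]
      have hlisp' : (isp.set (i * q) false).length = lim + 1 := by simpa using hlisp
      have hisp' : ∀ j, j < lim + 1 →
          (isp.set (i * q) false).getD j true = !pvCompMid k i q j := by
        intro j hj
        rw [pvGetD_set]
        by_cases hje : i * q = j
        · subst hje
          rw [if_pos ⟨rfl, by omega⟩]
          have hdw : pvDoneW i q (i * q) = true := pvDoneW_iff.2 ⟨q, hqp, le_refl q, rfl⟩
          unfold pvCompMid
          simp [hdw]
        · have hdd : pvDoneW i q j = pvDoneW i c j := by
            by_cases h : pvDoneW i c j = true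
            · rw [h]; exact (hDone_step j).2 (Or.inl h)
            · have h2 : ¬ pvDoneW i q j = true := fun hq1 => by
                rcases (hDone_step j).1 hq1 with h3 | h3
                · exact h h3
                · exact hje h3.symm
              simp [Bool.eq_false_iff.2 h, Bool.eq_false_iff.2 h2]
          rw [if_neg (by intro hc0; exact hje hc0.1), hisp j hj]
          unfold pvCompMid
          rw [hdd]
      have hmu'new : ∀ (v : Int), v = pvMuSpec (i * q) → ∀ j, j < lim + 1 →
          ((mu.set (i * q) v).getD j 0 = if pvMidSet k i q j then pvMuSpec j else 0) := by
        intro v hv j hj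
        rw [pvGetD_set]
        by_cases hje : i * q = j
        · subst hje
          rw [if_pos ⟨rfl, by omega⟩, if_pos ((hMid_step _).2 (Or.inr rfl)), hv]
        · rw [if_neg (fun hc0 => hje hc0.1), hmu j hj, hmm j hje]
      by_cases hdvd : q ∣ i
      · have hmod : (PySem.Int.mod (i : Int) (q : Int) == 0) = true := by
          rw [beq_iff_eq]
          exact (PySem.Int.mod_eq_zero_iff_dvd _ _).2 (Int.natCast_dvd_natCast.2 hdvd)
        rw [if_pos hmod]
        have hqmf : q = i.minFac := le_antisymm hmf_ge (Nat.minFac_le_of_dvd hqp.two_le hdvd)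
        have hsetmu : PySem.List.pySetD mu ((i : Int) * (q : Int)) 0 = mu.set (i * q) 0 := by
          rw [hcast, PySem.List.pySetD_natCast]
        rw [hsetisp, hsetmu]
        have hzero : (0 : Int) = pvMuSpec (i * q) :=
          (pvMuSpec_mul_zero hqp hi2 hmf_ge hdvd).symm
        exact pvEnd_of_mid lim k i q hi2 hik hil hmf_ge
          (fun q' h1 h2 h3 => by omega) (isp.set (i * q) false) (mu.set (i * q) 0)
          (by simpa using hlmu) hlisp' (hmu'new 0 hzero) hisp'
      · have hmod : ¬ (PySem.Int.mod (i : Int) (q : Int) == 0) = true := by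
          rw [beq_iff_eq]
          intro hc0
          exact hdvd (Int.natCast_dvd_natCast.1 ((PySem.Int.mod_eq_zero_iff_dvd _ _).1 hc0))
        rw [if_neg hmod]
        have hqlt : q < i.minFac := by
          rcases Nat.lt_or_ge q i.minFac with h | h
          · exact h
          · have : q = i.minFac := by omega
            exact absurd (this ▸ Nat.minFac_dvd i) hdvd
        have hmui : mu.getD i 0 = pvMuSpec i := by
          have hmid : pvMidSet k i c i = true := by
            by_cases hp : Nat.Prime i
            · simp [pvMidSet, hp]
            · have hltd := pvCompDiv_lt (j := i) hi2
              have hled : i / i.minFac ≤ k := by omega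
              simp [pvMidSet, pvWriterLe, pvCompLe, hp, hi2, hled]
          rw [hmu i (by omega), if_pos hmid]
        have hgetmu : PySem.List.pyGetD mu (i : Int) 0 = mu.getD i 0 := by
          rw [PySem.List.pyGetD_natCast]
        have hsetmu : PySem.List.pySetD mu ((i : Int) * (q : Int)) (-(PySem.List.pyGetD mu (i : Int) 0))
            = mu.set (i * q) (-(mu.getD i 0)) := by
          rw [hcast, hgetmu, PySem.List.pySetD_natCast]
        rw [hsetisp, hsetmu]
        have hval : -(mu.getD i 0) = pvMuSpec (i * q) := by
          rw [hmui, pvMuSpec_mul_neg hqp hi2 (le_of_lt hqlt) hdvd]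
        refine ih q (isp.set (i * q) false) (mu.set (i * q) (-(mu.getD i 0)))
          (fun r hr => ⟨(hmem r (List.mem_cons_of_mem q hr)).1,
            (hmem r (List.mem_cons_of_mem q hr)).2.1, hrest_gt r hr⟩)
          ((List.pairwise_cons.1 hsort).2)
          (fun r h1 h2 h3 => by
            rcases List.mem_cons.1 (hcompl r h1 h2 (by omega)) with h4 | h4
            · omega
            · exact h4)
          (fun r h1 h2 => by
            rcases Nat.lt_or_ge c r with h4 | h4
            · have hr : r = q := by
                rcases List.mem_cons.1 (hcompl r h1 (by omega) h4) with h5 | h5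
                · exact h5
                · have := hrest_gt _ h5; omega
              subst hr
              exact ⟨hdvd, hql⟩
            · exact hdone r h1 h4)
          (by simpa using hlmu) hlisp'
          (hmu'new (-(mu.getD i 0)) hval) hisp'

theorem pvDoneW_one (i j : Nat) : pvDoneW i 1 j = false := by
  unfold pvDoneW
  simp [List.range_succ, Nat.not_prime_zero, Nat.not_prime_one]

theorem pvMidSet_one (k i j : Nat) :
    pvMidSet k i 1 j = ((j == 1 || pvWriterLe k j) || (decide (j = i) && decide (Nat.Prime i))) := by
  unfold pvMidSet
  rw [pvDoneW_one]
  simp [Bool.or_assoc]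

theorem pvCompMid_one (k i j : Nat) : pvCompMid k i 1 j = pvCompLe k j := by
  unfold pvCompMid
  rw [pvDoneW_one]
  simp

theorem pvPrimesUpto_succ (k : Nat) :
    pvPrimesUpto (k + 1) = pvPrimesUpto k ++ (if Nat.Prime (k + 1) then [k + 1] else []) := by
  unfold pvPrimesUpto
  rw [List.range_succ, List.filter_append]
  congr 1
  by_cases h : Nat.Prime (k + 1) <;> simp [h]

theorem pvOuter_step (lim k : Nat) (hk : 1 ≤ k) (hkl : k + 1 ≤ lim)
    (st : List Int × List Bool × List Int) (hInv : pvInv (lim + 1) k st) :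
    pvInv (lim + 1) (k + 1) (pvOuterA (lim : Int) st (((k + 1 : Nat) : Int))) := by
  obtain ⟨hlmu, hlisp, hprimes, hmu, hisp⟩ := hInv
  have hi2 : (2 : Nat) ≤ k + 1 := by omega
  have hiN : k + 1 < lim + 1 := by omega
  have hget : PySem.List.pyGetD st.2.1 ((k + 1 : Nat) : Int) true = !pvCompLe k (k + 1) := by
    rw [PySem.List.pyGetD_natCast]
    exact hisp (k + 1) hiN
  by_cases hp : Nat.Prime (k + 1)
  · -- prime branch: appended to primes, mu[i] := -1
    have hb : pvCompLe k (k + 1) = false := by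
      unfold pvCompLe
      simp [hp]
    unfold pvOuterA
    rw [hget, hb]
    simp only [Bool.not_false, if_true]
    have hsetmu : PySem.List.pySetD st.1 ((k + 1 : Nat) : Int) (-1) = st.1.set (k + 1) (-1) := by
      rw [PySem.List.pySetD_natCast]
    rw [hsetmu]
    have hprimes' : st.2.2 ++ [((k + 1 : Nat) : Int)]
        = (pvPrimesUpto (k + 1)).map (fun q : Nat => (q : Int)) := by
      rw [hprimes, pvPrimesUpto_succ, if_pos hp]
      simp [pvPrimesUpto]
    rw [hprimes']
    have hES := pvInner_spec lim k (k + 1) hi2 rfl hkl (pvPrimesUpto (k + 1)) 1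
      st.2.1 (st.1.set (k + 1) (-1))
      (fun q hq => by
        unfold pvPrimesUpto at hq
        have h1 := List.mem_filter.1 hq
        have h2 : Nat.Prime q := by simpa using h1.2
        exact ⟨h2, by have := List.mem_range.1 h1.1; omega, by have := h2.two_le; omega⟩)
      (List.Pairwise.filter _ (List.pairwise_lt_range))
      (fun q h1 h2 h3 => List.mem_filter.2 ⟨List.mem_range.2 (by omega), by simpa using h1⟩)
      (fun q h1 h2 => absurd h2 (by have := h1.two_le; omega))
      (by simpa using hlmu) hlisp
      (fun j hj => by
        rw [pvGetD_set, pvMidSet_one]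
        by_cases hje : k + 1 = j
        · subst hje
          rw [if_pos ⟨rfl, by omega⟩]
          have : (decide (k + 1 = k + 1) && decide (Nat.Prime (k + 1))) = true := by simp [hp]
          rw [this, Bool.or_true, if_pos rfl, pvMuSpec_prime hp]
        · rw [if_neg (fun hc0 => hje hc0.1), hmu j hj]
          have : (decide (j = k + 1) && decide (Nat.Prime (k + 1))) = false := by
            simp [show j ≠ k + 1 from fun h => hje h.symm]
          rw [this, Bool.or_false])
      (fun j hj => by rw [pvCompMid_one]; exact hisp j hj)
    obtain ⟨h1, h2, h3, h4⟩ := hES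
    exact ⟨h1, h2, rfl, h3, h4⟩
  · -- composite branch
    have hb : pvCompLe k (k + 1) = true := by
      unfold pvCompLe
      have hltd := pvCompDiv_lt (j := k + 1) hi2
      have hled : (k + 1) / (k + 1).minFac ≤ k := by omega
      simp [hp, hled]
      omega
    unfold pvOuterA
    rw [hget, hb]
    simp only [Bool.not_true, if_false]
    have hprimes' : st.2.2 = (pvPrimesUpto (k + 1)).map (fun q : Nat => (q : Int)) := by
      rw [hprimes, pvPrimesUpto_succ, if_neg hp]
      simp
    rw [hprimes']
    have hES := pvInner_spec lim k (k + 1) hi2 rfl hkl (pvPrimesUpto (k + 1)) 1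
      st.2.1 st.1
      (fun q hq => by
        unfold pvPrimesUpto at hq
        have h1 := List.mem_filter.1 hq
        have h2 : Nat.Prime q := by simpa using h1.2
        exact ⟨h2, by have := List.mem_range.1 h1.1; omega, by have := h2.two_le; omega⟩)
      (List.Pairwise.filter _ (List.pairwise_lt_range))
      (fun q h1 h2 h3 => List.mem_filter.2 ⟨List.mem_range.2 (by omega), by simpa using h1⟩)
      (fun q h1 h2 => absurd h2 (by have := h1.two_le; omega))
      hlmu hlisp
      (fun j hj => by
        rw [pvMidSet_one, hmu j hj]
        have : (decide (j = k + 1) && decide (Nat.Prime (k + 1))) = false := by simp [hp]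
        rw [this, Bool.or_false])
      (fun j hj => by rw [pvCompMid_one]; exact hisp j hj)
    obtain ⟨h1, h2, h3, h4⟩ := hES
    exact ⟨h1, h2, rfl, h3, h4⟩

theorem pvCompLe_one (j : Nat) : pvCompLe 1 j = false := by
  unfold pvCompLe
  by_cases hp : Nat.Prime j
  · simp [hp]
  · by_cases h2 : 2 ≤ j
    · have := pvCompDivGe2 h2 hp
      simp [hp, h2, show ¬ j / j.minFac ≤ 1 by omega]
    · simp [h2]

theorem pvWriterLe_one (j : Nat) : pvWriterLe 1 j = false := by
  unfold pvWriterLe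
  rw [pvCompLe_one]
  simp only [Bool.or_false, Bool.and_eq_false_iff]
  by_cases hp : Nat.Prime j
  · exact Or.inr (by simp [show ¬ j ≤ 1 from fun h => by have := hp.two_le; omega])
  · exact Or.inl (by simp [hp])

theorem pvGetD_replicate {α : Type} (n j : Nat) (a d : α) :
    (List.replicate n a).getD j d = if j < n then a else d := by
  simp [List.getD_eq_getElem?_getD, List.getElem?_replicate]
  split_ifs <;> rfl

theorem pvInv_base (lim : Nat) (h : 1 ≤ lim) :
    pvInv (lim + 1) 1 (PySem.List.pySetD (List.replicate (((lim : Int) + 1)).toNat (0 : Int)) 1 1,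
      List.replicate (((lim : Int) + 1)).toNat true, ([] : List Int)) := by
  have hN : (((lim : Int) + 1)).toNat = lim + 1 := by omega
  rw [hN]
  have hset : PySem.List.pySetD (List.replicate (lim + 1) (0 : Int)) 1 1
      = (List.replicate (lim + 1) (0 : Int)).set 1 1 := by
    have h1 : (1 : Int) = ((1 : Nat) : Int) := rfl
    rw [h1, PySem.List.pySetD_natCast]
  rw [hset]
  refine ⟨by simp, by simp, by simp [pvPrimesUpto]; decide, ?_, ?_⟩
  · intro j hj
    rw [pvGetD_set, pvGetD_replicate]
    by_cases hje : j = 1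
    · subst hje
      rw [if_pos ⟨rfl, by simp; omega⟩]
      simp [pvMuSpec_one]
    · rw [if_neg (fun hc => hje hc.1.symm), if_pos hj,
        if_neg (by simp [hje, pvWriterLe_one])]
  · intro j hj
    rw [pvGetD_replicate, if_pos hj, pvCompLe_one]
    rfl

theorem pvFoldA (lim : Nat) (hlim : 1 ≤ lim) : ∀ k, 1 ≤ k → k ≤ lim →
    pvInv (lim + 1) k ((PySem.List.pyRange 2 ((k : Int) + 1) 1).foldl (pvOuterA (lim : Int))
      (PySem.List.pySetD (List.replicate (((lim : Int) + 1)).toNat (0 : Int)) 1 1,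
       List.replicate (((lim : Int) + 1)).toNat true, ([] : List Int))) := by
  intro k
  induction k with
  | zero => omega
  | succ n ihn =>
    intro _ hle
    rcases Nat.eq_zero_or_pos n with hn | hn
    · subst hn
      rw [PySem.List.pyRange_one_eq_nil (by norm_num)]
      exact pvInv_base lim hlim
    · have hsplit : PySem.List.pyRange 2 (((n + 1 : Nat) : Int) + 1) 1
          = PySem.List.pyRange 2 ((n : Int) + 1) 1 ++ [(n : Int) + 1] := by
        have : ((n + 1 : Nat) : Int) + 1 = ((n : Int) + 1) + 1 := by push_cast; ring
        rw [this, PySem.List.pyRange_one_succ_right (by omega)]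
      rw [hsplit, List.foldl_append]
      simp only [List.foldl_cons, List.foldl_nil]
      have hstep := pvOuter_step lim n hn hle _ (ihn hn (by omega))
      have hcast : (((n + 1 : Nat) : Int)) = (n : Int) + 1 := by push_cast; ring
      rw [hcast] at hstep
      exact hstep

theorem pvMuA (lim : Nat) (h : 1 ≤ lim) :
    (pvSieveA (lim : Int)).1 = pvMuRef (lim + 1) := by
  unfold pvSieveA
  obtain ⟨hlmu, _, _, hmu, _⟩ := pvFoldA lim h lim h (le_refl lim)
  apply List.ext_getElem (by simpa [pvMuRef] using hlmu)
  intro j hj1 hj2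
  have hjlt : j < lim + 1 := by rw [hlmu] at hj1; exact hj1
  have hval := hmu j hjlt
  rw [← List.getD_eq_getElem _ 0 hj1, hval]
  have hr : (pvMuRef (lim + 1))[j] = pvMuSpec j := by
    unfold pvMuRef
    simp
  rw [hr]
  by_cases hc : (j == 1 || pvWriterLe lim j) = true
  · rw [if_pos hc]
  · rw [if_neg hc]
    simp only [Bool.or_eq_true, beq_iff_eq] at hc
    push_neg at hc
    obtain ⟨hj1ne, hw⟩ := hc
    match j, hjlt with
    | 0, _ => rw [pvMuSpec_zero]
    | 1, _ => exact absurd rfl hj1ne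
    | (m + 2), hlt =>
      exfalso
      apply hw
      unfold pvWriterLe pvCompLe
      by_cases hp : Nat.Prime (m + 2)
      · simp [hp]; omega
      · have hltd := pvCompDiv_lt (j := m + 2) (by omega)
        simp [hp, show m + 2 ≤ lim by omega, show (m + 2) / (m + 2).minFac ≤ lim by omega]

theorem pvMFold (lim : Nat) (hlim : 1 ≤ lim) : ∀ k, k ≤ lim →
    (PySem.List.pyRange 1 ((k : Int) + 1) 1).foldl
      (fun M n => PySem.List.pySetD M n
        (PySem.List.pyGetD M (n - 1) 0 + PySem.List.pyGetD (pvMuRef (lim + 1)) n 0))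
      (List.replicate (((lim : Int) + 1)).toNat (0 : Int))
    = (List.range (k + 1)).map pvSref ++ List.replicate (lim - k) (0 : Int) := by
  have hN : (((lim : Int) + 1)).toNat = lim + 1 := by omega
  intro k
  induction k with
  | zero =>
    intro _
    rw [PySem.List.pyRange_one_eq_nil (by norm_num), List.foldl_nil, hN]
    have : pvSref 0 = 0 := by simp [pvSref, pvMuSpec_zero]
    simp [this, List.replicate_succ]
  | succ n ihn =>
    intro hle
    have hsplit : PySem.List.pyRange 1 (((n + 1 : Nat) : Int) + 1) 1
        = PySem.List.pyRange 1 ((n : Int) + 1) 1 ++ [(n : Int) + 1] := by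
      have : ((n + 1 : Nat) : Int) + 1 = ((n : Int) + 1) + 1 := by push_cast; ring
      rw [this, PySem.List.pyRange_one_succ_right (by omega)]
    rw [hsplit, List.foldl_append, ihn (by omega)]
    simp only [List.foldl_cons, List.foldl_nil]
    have hc1 : ((n : Int) + 1) - 1 = ((n : Nat) : Int) := by ring
    have hc2 : ((n : Int) + 1) = ((n + 1 : Nat) : Int) := by push_cast; ring
    set A := (List.range (n + 1)).map pvSref with hA
    have hAlen : A.length = n + 1 := by simp [hA]
    have hget1 : PySem.List.pyGetD (A ++ List.replicate (lim - n) (0 : Int)) (((n : Int) + 1) - 1) 0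
        = pvSref n := by
      rw [hc1, PySem.List.pyGetD_natCast]
      rw [List.getD_eq_getElem?_getD, List.getElem?_append_left (by omega)]
      simp [hA]
    have hget2 : PySem.List.pyGetD (pvMuRef (lim + 1)) ((n : Int) + 1) 0 = pvMuSpec (n + 1) := by
      rw [hc2, PySem.List.pyGetD_natCast]
      unfold pvMuRef
      rw [List.getD_eq_getElem?_getD]
      simp [List.getElem?_map, List.getElem?_range (by omega : n + 1 < lim + 1)]
    rw [hget1, hget2]
    have hset : PySem.List.pySetD (A ++ List.replicate (lim - n) (0 : Int)) ((n : Int) + 1)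
        (pvSref n + pvMuSpec (n + 1))
        = A ++ (List.replicate (lim - n) (0 : Int)).set 0 (pvSref n + pvMuSpec (n + 1)) := by
      rw [hc2, PySem.List.pySetD_natCast]
      rw [List.set_append]
      simp [hAlen]
    rw [hset]
    have hrep : lim - n = (lim - (n + 1)) + 1 := by omega
    rw [hrep, List.replicate_succ, List.set_cons_zero]
    rw [← pvSref_succ]
    rw [List.range_succ (n := n + 1), List.map_append]
    simp [hA]

theorem pvA_eq (lim : Nat) (h : 1 ≤ lim) :
    mertens_table (lim : Int) = (pvMRef (lim + 1), pvMuRef (lim + 1)) := by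
  unfold mertens_table pvMertM
  rw [pvMuA lim h]
  rw [pvMFold lim h lim (le_refl lim)]
  simp [pvMRef]


-- ===== VERDICT (by name: the statement is the Claim_ definition above) =====
theorem mertens_table_spec : Claim_equal_mertens_table := by
  intro limit _ hpre
  unfold Spec_mertens_table
  unfold Pre_mertens_table at hpre
  obtain ⟨lim, rfl⟩ : ∃ n : Nat, limit = (n : Int) := ⟨limit.toNat, (Int.toNat_of_nonneg (by omega)).symm⟩
  have hl : 1 ≤ lim := by exact_mod_cast hpre
  rw [pvA_eq lim hl, pvB_eq lim hl]
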